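-- pv_equiv track=rewrite | github.com/dominik-ba/Programmatic-Speedback-Rotation | rotate.py | split_by_two
-- ===== SOURCE A (Python) =====
-- def split_by_two(group):
--     sub_groups = {}
--     i = 0
--     x = 0
--     for member, room in group.items():
--         if (even(i)):
--             sub_groups[x] = {member: room}
--         else:
--             sub_groups[x] = {**sub_groups[x], **{member: room}}
--             x+= 1
--         i+= 1
--     return sub_groups
--
-- def even(number):
--     return (number % 2) == 0
-- ===== SOURCE B (Python) =====
-- def split_by_two(group):
--     items = list(group.items())
--     return {j: dict(items[k:k+2]) for j, k in enumerate(range(0, len(items), 2))}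
-- ===== Notes on version B (the rewrite author's own statement) =====
-- stated objective: simpler
-- what changed: Replaces the even/odd-index state machine with dict-merge branches by a single comprehension that slices the materialized items into stride-2 chunks and builds each pair dict directly.
import Mathlib
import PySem

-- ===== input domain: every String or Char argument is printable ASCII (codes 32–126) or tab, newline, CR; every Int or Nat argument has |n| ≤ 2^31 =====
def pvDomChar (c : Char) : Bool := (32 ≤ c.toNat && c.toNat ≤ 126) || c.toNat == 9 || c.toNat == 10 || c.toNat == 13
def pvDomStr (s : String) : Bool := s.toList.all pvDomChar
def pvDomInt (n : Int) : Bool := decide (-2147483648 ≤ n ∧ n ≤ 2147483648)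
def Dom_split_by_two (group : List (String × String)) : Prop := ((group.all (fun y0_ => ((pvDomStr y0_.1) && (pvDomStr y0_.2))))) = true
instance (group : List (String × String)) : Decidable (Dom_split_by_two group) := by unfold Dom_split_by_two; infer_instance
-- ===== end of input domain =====

-- B replaces A's even/odd-index state machine (with its dict-merge branch) by slicing the
-- materialized items into stride-2 chunks; objective: simpler. The 'group' argument is a
-- Python dict, modelled as an association list: both ports read it through
-- PySem.Dict.ofList, exactly as CPython's dict construction deduplicates keys.

-- ===== PORT A =====
def even (number : Int) : Bool := (PySem.Int.mod number 2) == 0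

-- the body of A's 'for member, room in group.items():' loop, over the state (sub_groups, i, x)
def pvStepA (st : PySem.Dict Int (PySem.Dict String String) × Int × Int) (p : String × String) :
    PySem.Dict Int (PySem.Dict String String) × Int × Int :=
  let subs := st.1
  let i := st.2.1
  let x := st.2.2
  if even i then
    (subs.insert x (PySem.Dict.ofList [(p.1, p.2)]), i + 1, x)
  else
    -- sub_groups[x] is always present here (the even branch set it); getD's default is unreachable
    (subs.insert x ((subs.getD x PySem.Dict.empty).update [(p.1, p.2)]), i + 1, x + 1)

def split_by_two (group : List (String × String)) : List (Int × List (String × String)) :=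
  let st := ((PySem.Dict.ofList group).items).foldl pvStepA (PySem.Dict.empty, 0, 0)
  st.1.items.map (fun q => (q.1, q.2.items))

-- ===== PORT B =====
def split_by_two_alt (group : List (String × String)) : List (Int × List (String × String)) :=
  let items := (PySem.Dict.ofList group).items
  (PySem.List.enumerate (PySem.List.pyRange 0 items.length 2) 0).map
    (fun jk => (jk.1, (PySem.Dict.ofList (PySem.List.slice items (some jk.2) (some (jk.2 + 2)))).items))

-- ===== PRECONDITION & SPEC =====
def Spec_split_by_two (group : List (String × String)) (out : List (Int × List (String × String))) : Prop := out = split_by_two_alt group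
instance (group : List (String × String)) (out : List (Int × List (String × String))) : Decidable (Spec_split_by_two group out) := by unfold Spec_split_by_two; infer_instance

-- ===== CLAIM (what is proved, stated in full; the proofs are below) =====
def Claim_equal_split_by_two : Prop := ∀ (group : List (String × String)), Dom_split_by_two group → Spec_split_by_two group (split_by_two group)

-- ===== LEMMAS AND PROOFS =====

-- two-at-a-time induction skeleton over the item list (used via pvPairs.induct)
def pvPairs : List (String × String) → List (List (String × String))
  | [] => []
  | [a] => [[a]]
  | _ :: b :: t => [b] :: pvPairs t

-- the common closed form both ports reach: chunk m carries key x+m and the pair dict of items[2m:2m+2]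
lemma pvLoopA (l : List (String × String)) :
    ∀ (subs : PySem.Dict Int (PySem.Dict String String)) (i x : Int),
    i % 2 = 0 → (∀ k ∈ subs.keys, k < x) →
    (l.foldl pvStepA (subs, i, x)).1.items
      = subs.items ++ (List.range ((l.length + 1) / 2)).map
          (fun (m : Nat) => (x + (m : Int), PySem.Dict.ofList ((l.drop (2 * m)).take 2))) := by
  induction l using pvPairs.induct with
  | case1 =>
      intro subs i x hi hk
      simp
  | case2 a =>
      intro subs i x hi hk
      have hc : subs.contains x = false := by
        rcases hcc : subs.contains x
        · rfl
        · exact absurd (hk x ((PySem.Dict.contains_iff_mem_keys _ _).1 hcc)) (lt_irrefl x)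
      have he : even i = true := by
        simp [even, hi]
      simp [List.foldl, pvStepA, he, PySem.Dict.items_insert_of_not_contains _ _ hc,
            List.range_succ]
  | case3 a b t ih =>
      intro subs i x hi hk
      have hc : subs.contains x = false := by
        rcases hcc : subs.contains x
        · rfl
        · exact absurd (hk x ((PySem.Dict.contains_iff_mem_keys _ _).1 hcc)) (lt_irrefl x)
      have he : even i = true := by
        simp [even, hi]
      have ho : even (i + 1) = false := by
        simp [even]
        omega
      -- two steps of the loop consume the chunk [a, b]
      have hstep2 : (a :: b :: t).foldl pvStepA (subs, i, x)
          = t.foldl pvStepA (subs.insert x (PySem.Dict.ofList [a, b]), i + 1 + 1, x + 1) := by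
        have h1 : pvStepA (subs, i, x) a = (subs.insert x (PySem.Dict.ofList [(a.1, a.2)]), i + 1, x) := by
          simp [pvStepA, he]
        have hab : (PySem.Dict.ofList [(a.1, a.2)] : PySem.Dict String String).update [(b.1, b.2)]
            = PySem.Dict.ofList [a, b] := rfl
        have h2 : pvStepA (subs.insert x (PySem.Dict.ofList [(a.1, a.2)]), i + 1, x) b
            = (subs.insert x (PySem.Dict.ofList [a, b]), i + 1 + 1, x + 1) := by
          simp only [pvStepA]
          rw [if_neg (by simp [ho])]
          simp only [PySem.Dict.getD_insert_self]
          rw [hab, PySem.Dict.insert_insert_self]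
        simp [List.foldl, h1, h2]
      rw [hstep2,
          ih (subs.insert x (PySem.Dict.ofList [a, b])) (i + 1 + 1) (x + 1) (by omega) ?hkeys]
      case hkeys =>
        intro k hkmem
        rcases (PySem.Dict.mem_keys_insert _ _ _ _).1 hkmem with h | h
        · omega
        · exact lt_trans (hk k h) (by omega)
      -- reassemble the right-hand side
      rw [PySem.Dict.items_insert_of_not_contains _ _ hc]
      have hlen : (((a :: b :: t).length + 1) / 2) = ((t.length + 1) / 2) + 1 := by
        simp only [List.length_cons]; omega
      rw [hlen, List.range_succ_eq_map, List.map_cons, List.map_map]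
      have hmap : List.map ((fun (m : Nat) => (x + (m : Int),
              PySem.Dict.ofList (((a :: b :: t).drop (2 * m)).take 2))) ∘ Nat.succ)
            (List.range ((t.length + 1) / 2))
          = List.map (fun (m : Nat) => (x + 1 + (m : Int),
              PySem.Dict.ofList ((t.drop (2 * m)).take 2)))
            (List.range ((t.length + 1) / 2)) := by
        apply List.map_congr_left
        intro m hm
        simp only [Function.comp_apply]
        refine Prod.ext ?_ ?_
        · omega
        · have h2m : 2 * Nat.succ m = (2 * m) + 1 + 1 := by omega
          rw [h2m]
          simp [List.drop]
      rw [hmap]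
      simp [List.append_assoc]

-- enumerate distributes over map (indices are unchanged)
lemma pvEnumMap {α β : Type} (g : α → β) :
    ∀ (xs : List α) (s : Int),
    PySem.List.enumerate (xs.map g) s = (PySem.List.enumerate xs s).map (fun p => (p.1, g p.2)) := by
  intro xs
  induction xs with
  | nil => intro s; simp [PySem.List.enumerate_nil]
  | cons x xs ih => intro s; simp [PySem.List.enumerate_cons, ih]

-- enumerate of range pairs each index with itself
lemma pvEnumRange (n : Nat) :
    PySem.List.enumerate (List.range n) 0 = (List.range n).map (fun (m : Nat) => ((m : Int), m)) := by
  apply List.ext_getElem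
  · simp [PySem.List.length_enumerate]
  · intro k h1 h2
    rw [PySem.List.getElem_enumerate]
    simp

-- B reaches the same closed form as A's loop (with first key 0)
lemma pvAltClosed (group : List (String × String)) :
    split_by_two_alt group
      = (List.range ((((PySem.Dict.ofList group).items).length + 1) / 2)).map
          (fun (m : Nat) => ((m : Int),
            (PySem.Dict.ofList ((((PySem.Dict.ofList group).items).drop (2 * m)).take 2)).items)) := by
  simp only [split_by_two_alt]
  set l := (PySem.Dict.ofList group).items with hl
  have hcnt : (if (0 : Int) < (l.length : Int)
      then ((((l.length : Int) - 0 + 2 - 1)) / 2).toNat else 0) = (l.length + 1) / 2 := by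
    split_ifs with h
    · omega
    · omega
  rw [PySem.List.pyRange_of_pos 0 (l.length : Int) (by norm_num : (0:Int) < 2), hcnt,
      pvEnumMap, pvEnumRange, List.map_map, List.map_map]
  apply List.map_congr_left
  intro m _
  simp only [Function.comp_apply]
  refine Prod.ext rfl ?_
  have h1 : (0 : Int) + 2 * (m : Int) = ((2 * m : Nat) : Int) := by push_cast; ring
  have h2 : ((2 * m : Nat) : Int) + 2 = ((2 * m + 2 : Nat) : Int) := by push_cast; ring
  rw [h1, h2, PySem.List.slice_natCast]
  have h3 : 2 * m + 2 - 2 * m = 2 := by omega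
  rw [h3]

-- ===== VERDICT (by name: the statement is the Claim_ definition above) =====
theorem split_by_two_spec : Claim_equal_split_by_two := by
  intro group _
  unfold Spec_split_by_two
  rw [pvAltClosed]
  simp only [split_by_two]
  rw [pvLoopA _ PySem.Dict.empty 0 0 (by norm_num) (by simp [PySem.Dict.keys_empty])]
  have hemp : (PySem.Dict.empty : PySem.Dict Int (PySem.Dict String String)).items = [] := rfl
  simp [hemp, List.map_map, Function.comp_def]
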